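-- pv_equiv track=rewrite | github.com/ChicharronP/Programacion_logica | resolucion_sld/unificacion.py | unificacion
-- ===== SOURCE A (Python) =====
-- def unificacion(sintomas_a_probar, sintomas_enfermedad):
--     if not sintomas_a_probar:
--         return True
--
--     (parte_afectada, sintoma) = sintomas_a_probar[0]
--     resto_sintomas = sintomas_a_probar[1:]
--
--     if (parte_afectada in sintomas_enfermedad and
--         sintoma in sintomas_enfermedad[parte_afectada]):
--
--         return unificacion(resto_sintomas, sintomas_enfermedad)
--     else:
--         return False
-- ===== SOURCE B (Python) =====
-- def unificacion(sintomas_a_probar, sintomas_enfermedad):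
--     requeridos = {}
--     for parte_afectada, sintoma in sintomas_a_probar:
--         requeridos.setdefault(parte_afectada, []).append(sintoma)
--     for parte_afectada, sintomas in requeridos.items():
--         if parte_afectada not in sintomas_enfermedad:
--             return False
--         disponibles = sintomas_enfermedad[parte_afectada]
--         if any(s not in disponibles for s in sintomas):
--             return False
--     return True
-- ===== Notes on version B (the rewrite author's own statement) =====
-- stated objective: alternative
-- what changed: Instead of recursing pair by pair, B first groups the requested symptoms by body part into a dict and then checks each distinct part once, looking up the disease entry a single time per part and testing all its grouped symptoms against it.
import Mathlib
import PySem

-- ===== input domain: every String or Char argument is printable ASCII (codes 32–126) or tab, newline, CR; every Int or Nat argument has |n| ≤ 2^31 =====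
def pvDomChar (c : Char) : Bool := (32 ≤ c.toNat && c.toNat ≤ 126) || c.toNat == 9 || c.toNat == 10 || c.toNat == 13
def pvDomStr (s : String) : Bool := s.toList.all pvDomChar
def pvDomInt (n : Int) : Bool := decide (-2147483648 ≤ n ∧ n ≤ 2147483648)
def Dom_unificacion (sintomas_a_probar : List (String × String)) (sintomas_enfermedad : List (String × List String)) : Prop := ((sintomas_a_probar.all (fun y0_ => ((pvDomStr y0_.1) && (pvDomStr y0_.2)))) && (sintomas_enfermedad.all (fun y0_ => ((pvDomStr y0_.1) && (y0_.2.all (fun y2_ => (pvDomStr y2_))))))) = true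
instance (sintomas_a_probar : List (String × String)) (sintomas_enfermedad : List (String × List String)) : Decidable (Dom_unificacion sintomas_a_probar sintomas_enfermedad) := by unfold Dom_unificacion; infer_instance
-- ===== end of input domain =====

-- B groups the requested symptoms by body part first, then checks each distinct part once
-- against the disease dict (alternative decomposition); same value everywhere.

-- ===== PORT A =====
def unificacion (sintomas_a_probar : List (String × String)) (sintomas_enfermedad : List (String × List String)) : Bool :=
  match sintomas_a_probar with
  | [] => true
  | (parte_afectada, sintoma) :: resto_sintomas =>
    -- 'parte_afectada in d and sintoma in d[parte_afectada]' (short-circuit &&; getD exact under contains)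
    if ((PySem.Dict.mk sintomas_enfermedad).contains parte_afectada
        && ((PySem.Dict.mk sintomas_enfermedad).getD parte_afectada []).contains sintoma) then
      unificacion resto_sintomas sintomas_enfermedad
    else
      false

-- ===== PORT B =====
-- second loop of Source B: for parte_afectada, sintomas in requeridos.items(): … with early returns
def pvCheckGrupos (sintomas_enfermedad : List (String × List String)) : List (String × List String) → Bool
  | [] => true
  | (parte_afectada, sintomas) :: rest =>
    if !(PySem.Dict.mk sintomas_enfermedad).contains parte_afectada then false
    else
      let disponibles := (PySem.Dict.mk sintomas_enfermedad).getD parte_afectada []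
      if sintomas.any (fun s => !disponibles.contains s) then false
      else pvCheckGrupos sintomas_enfermedad rest

def unificacion_alt (sintomas_a_probar : List (String × String)) (sintomas_enfermedad : List (String × List String)) : Bool :=
  -- first loop of Source B: requeridos.setdefault(pa, []).append(s)  ==  requeridos[pa] = requeridos.get(pa, []) + [s]
  let requeridos : PySem.Dict String (List String) :=
    sintomas_a_probar.foldl (fun r p => r.modify p.1 [] (· ++ [p.2])) PySem.Dict.empty
  pvCheckGrupos sintomas_enfermedad requeridos.items

-- ===== PRECONDITION & SPEC =====
def Spec_unificacion (sintomas_a_probar : List (String × String)) (sintomas_enfermedad : List (String × List String)) (out : Bool) : Prop := out = unificacion_alt sintomas_a_probar sintomas_enfermedad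
instance (sintomas_a_probar : List (String × String)) (sintomas_enfermedad : List (String × List String)) (out : Bool) : Decidable (Spec_unificacion sintomas_a_probar sintomas_enfermedad out) := by unfold Spec_unificacion; infer_instance

-- ===== CLAIM (what is proved, stated in full; the proofs are below) =====
def Claim_equal_unificacion : Prop := ∀ (sintomas_a_probar : List (String × String)) (sintomas_enfermedad : List (String × List String)), Dom_unificacion sintomas_a_probar sintomas_enfermedad → Spec_unificacion sintomas_a_probar sintomas_enfermedad (unificacion sintomas_a_probar sintomas_enfermedad)

-- ===== LEMMAS AND PROOFS =====

-- the per-pair condition both programs test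
def pvPred (d : List (String × List String)) (p : String × String) : Bool :=
  (PySem.Dict.mk d).contains p.1 && ((PySem.Dict.mk d).getD p.1 []).contains p.2

theorem unificacion_eq_all (xs : List (String × String)) (d : List (String × List String)) :
    unificacion xs d = xs.all (pvPred d) := by
  induction xs with
  | nil => rfl
  | cons p rest ih =>
    obtain ⟨pa, s⟩ := p
    rw [unificacion, List.all_cons, ih]
    simp only [pvPred]
    split_ifs with h
    · rw [h, Bool.true_and]
    · rw [Bool.eq_false_iff.mpr h, Bool.false_and]

theorem checkGrupos_eq_all (d : List (String × List String)) (g : List (String × List String)) :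
    pvCheckGrupos d g
      = g.all (fun q => (PySem.Dict.mk d).contains q.1
          && q.2.all (fun s => ((PySem.Dict.mk d).getD q.1 []).contains s)) := by
  induction g with
  | nil => rfl
  | cons q rest ih =>
    obtain ⟨pa, ss⟩ := q
    rw [pvCheckGrupos, List.all_cons, ih]
    cases hc : (PySem.Dict.mk d).contains pa with
    | false => simp
    | true =>
      cases ha : ss.any (fun s => !((PySem.Dict.mk d).getD pa []).contains s) with
      | true =>
        have hmem : ∃ x ∈ ss, x ∉ (PySem.Dict.mk d).getD pa [] := by
          simp only [List.any_eq_true, Bool.not_eq_true'] at ha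
          obtain ⟨s, hs, hns⟩ := ha
          exact ⟨s, hs, by simpa using hns⟩
        have hallf : (ss.all fun s => ((PySem.Dict.mk d).getD pa []).contains s) = false := by
          obtain ⟨s, hs, hn⟩ := hmem
          exact List.all_eq_false.mpr ⟨s, hs, by simpa using hn⟩
        simp [hmem]
      | false =>
        have hmem : ∀ x ∈ ss, x ∈ (PySem.Dict.mk d).getD pa [] := by
          simp only [List.any_eq_false] at ha
          intro s hs
          simpa using ha s hs
        have h1 : ¬ ∃ x ∈ ss, x ∉ (PySem.Dict.mk d).getD pa [] :=
          fun ⟨x, hx, hn⟩ => hn (hmem x hx)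
        have h2 : (ss.all fun s => ((PySem.Dict.mk d).getD pa []).contains s) = true :=
          List.all_eq_true.mpr fun s hs => by simpa using hmem s hs
        simp [h1]
        exact fun _ => hmem

theorem unificacion_spec_aux (xs : List (String × String)) (d : List (String × List String)) :
    unificacion xs d = unificacion_alt xs d := by
  rw [unificacion_eq_all, unificacion_alt]
  set r := xs.foldl (fun r p => r.modify p.1 [] (· ++ [p.2])) PySem.Dict.empty with hr
  have hnd : r.keys.Nodup := by
    rw [hr]
    exact PySem.Dict.nodup_keys_foldl_modify_key xs (·.1) [] (fun _ p => (· ++ [p.2])) PySem.Dict.empty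
      PySem.Dict.nodup_keys_empty
  have hkeys : ∀ k, k ∈ r.keys ↔ k ∈ xs.map (·.1) := by
    intro k
    rw [hr, PySem.Dict.keys_foldl_modify_key, PySem.Dict.keys_empty]
    simp [PySem.Set.mem_update]
  have hgetD : ∀ k, r.getD k [] = (xs.filter (fun p => p.1 == k)).map (·.2) := by
    intro k
    rw [hr, PySem.Dict.getD_foldl_modify_append]
    simp [PySem.Dict.getD_empty]
  rw [checkGrupos_eq_all, PySem.Dict.items_eq_map_keys r hnd [], List.all_map, Bool.eq_iff_iff]
  simp only [List.all_eq_true, Function.comp_apply]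
  constructor
  · -- per-pair check ⇒ grouped check
    intro h k hk
    rw [hgetD]
    obtain ⟨q, hq, hq1⟩ := List.mem_map.mp ((hkeys k).mp hk)
    have hqpred := h q hq
    simp only [pvPred, Bool.and_eq_true] at hqpred
    simp only [Bool.and_eq_true, List.all_eq_true, List.mem_map, List.mem_filter]
    refine ⟨hq1 ▸ hqpred.1, ?_⟩
    rintro s ⟨p, ⟨hp, hpk⟩, hps⟩
    have hpred := h p hp
    have hpk' : p.1 = k := by simpa using hpk
    simp only [pvPred, Bool.and_eq_true] at hpred
    rw [← hpk', ← hps]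
    simpa using hpred.2
  · -- grouped check ⇒ per-pair check
    intro h p hp
    have hk : p.1 ∈ r.keys := (hkeys p.1).mpr (List.mem_map.mpr ⟨p, hp, rfl⟩)
    have := h p.1 hk
    rw [hgetD] at this
    simp only [Bool.and_eq_true, List.all_eq_true, List.mem_map, List.mem_filter] at this
    obtain ⟨hc, hall⟩ := this
    have h2 : (((PySem.Dict.mk d : PySem.Dict String (List String))).getD p.1 []).contains p.2 = true :=
      hall p.2 ⟨p, ⟨hp, by simp⟩, rfl⟩
    simp only [pvPred, Bool.and_eq_true]
    exact ⟨hc, h2⟩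

-- ===== VERDICT (by name: the statement is the Claim_ definition above) =====
theorem unificacion_spec : Claim_equal_unificacion := by
  intro xs d _
  exact unificacion_spec_aux xs d
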